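-- pv_equiv track=rewrite | github.com/emilyemorehouse/ast-and-me | code/tmp_rtrip/doctest.py | _ellipsis_match
-- ===== SOURCE A (Python) =====
-- ELLIPSIS_MARKER = '...'
--
-- def _ellipsis_match(want, got):
--     """
--     Essentially the only subtle case:
--     >>> _ellipsis_match('aa...aa', 'aaa')
--     False
--     """
--     if ELLIPSIS_MARKER not in want:
--         return want == got
--     ws = want.split(ELLIPSIS_MARKER)
--     assert len(ws) >= 2
--     startpos, endpos = 0, len(got)
--     w = ws[0]
--     if w:
--         if got.startswith(w):
--             startpos = len(w)
--             del ws[0]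
--         else:
--             return False
--     w = ws[-1]
--     if w:
--         if got.endswith(w):
--             endpos -= len(w)
--             del ws[-1]
--         else:
--             return False
--     if startpos > endpos:
--         return False
--     for w in ws:
--         startpos = got.find(w, startpos, endpos)
--         if startpos < 0:
--             return False
--         startpos += len(w)
--     return True
-- ===== SOURCE B (Python) =====
-- ELLIPSIS_MARKER = '...'
--
-- def _tail(segs, s):
--     # s must contain segs[0], ..., segs[-2] in order (greedy leftmost),
--     # and end with segs[-1].
--     if len(segs) == 1:
--         return s.endswith(segs[0])
--     i = s.find(segs[0])
--     if i < 0: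
--         return False
--     return _tail(segs[1:], s[i + len(segs[0]):])
--
-- def _ellipsis_match(want, got):
--     if ELLIPSIS_MARKER not in want:
--         return want == got
--     first, *rest = want.split(ELLIPSIS_MARKER)
--     if not got.startswith(first):
--         return False
--     return _tail(rest, got[len(first):])
-- ===== Notes on version B (the rewrite author's own statement) =====
-- stated objective: simpler
-- what changed: A's startpos/endpos index bookkeeping, in-place segment-list deletions and endpos-bounded find loop are replaced by a short recursive greedy matcher over string slices: anchor the first segment with startswith, greedily consume each middle segment from the remaining slice with find, and check the last segment with one final endswith.
import Mathlib
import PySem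

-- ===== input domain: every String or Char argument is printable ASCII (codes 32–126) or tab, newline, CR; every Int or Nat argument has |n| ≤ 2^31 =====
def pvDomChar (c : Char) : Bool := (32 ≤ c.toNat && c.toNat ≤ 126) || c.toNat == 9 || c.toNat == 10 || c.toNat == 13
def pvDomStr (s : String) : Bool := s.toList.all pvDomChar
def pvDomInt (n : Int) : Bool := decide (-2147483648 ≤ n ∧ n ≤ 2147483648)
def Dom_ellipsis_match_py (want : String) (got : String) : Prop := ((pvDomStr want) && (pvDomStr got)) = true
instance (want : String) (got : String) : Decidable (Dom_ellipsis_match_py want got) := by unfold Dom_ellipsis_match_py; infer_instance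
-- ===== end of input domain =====

-- B replaces A's startpos/endpos index bookkeeping and bounded-find loop by a
-- recursive greedy matcher over string slices with a final endswith; objective: simpler.

-- ===== PORT A =====
-- the for-loop over the remaining segments: startpos = got.find(w, startpos, endpos); …
def pvLoopA (got : List Char) (endpos : Int) : List (List Char) → Int → Bool
  | [], _ => true
  | w :: rest, startpos =>
      let s := PySem.Chars.findFrom got w startpos (some endpos)
      if s < 0 then false
      else pvLoopA got endpos rest (s + (w.length : Int))

-- the code from `if startpos > endpos` on
def pvFinalA (got : List Char) (ws : List (List Char)) (startpos endpos : Int) : Bool :=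
  if startpos > endpos then false else pvLoopA got endpos ws startpos

-- the code from `w = ws[-1]` on (ws[-1] on an empty list is unreachable in Python; defaulted)
def pvAfterFirstA (got : List Char) (ws : List (List Char)) (startpos endpos : Int) : Bool :=
  let w := (ws.getLast?).getD []
  if w ≠ [] then
    if PySem.Chars.endswith got w then
      pvFinalA got ws.dropLast startpos (endpos - (w.length : Int))
    else false
  else pvFinalA got ws startpos endpos

def ellipsis_match_py (want : String) (got : String) : Bool :=
  if PySem.Str.isIn "..." want = false then want == got
  else
    let ws := PySem.Chars.splitOn want.toList "...".toList
    let gotL := got.toList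
    let startpos : Int := 0
    let endpos : Int := (gotL.length : Int)
    let w := ws.headD []
    if w ≠ [] then
      if PySem.Chars.startswith gotL w then
        pvAfterFirstA gotL ws.tail (w.length : Int) endpos
      else false
    else pvAfterFirstA gotL ws startpos endpos

-- ===== PORT B =====
-- _tail from Source B (the [] case is unreachable from _ellipsis_match; defaulted)
def pvTailB : List (List Char) → List Char → Bool
  | [], _ => true
  | [last], s => PySem.Chars.endswith s last
  | seg :: rest, s =>
      let i := PySem.Chars.find s seg
      if i < 0 then false
      else pvTailB rest (PySem.Chars.slice s (some (i + (seg.length : Int))) none)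

def ellipsis_match_py_alt (want : String) (got : String) : Bool :=
  if PySem.Str.isIn "..." want = false then want == got
  else
    let segs := PySem.Chars.splitOn want.toList "...".toList
    let first := segs.headD []
    let rest := segs.tail
    if PySem.Chars.startswith got.toList first then
      pvTailB rest (PySem.Chars.slice got.toList (some (first.length : Int)) none)
    else false

-- ===== PRECONDITION & SPEC =====
def Spec_ellipsis_match_py (want : String) (got : String) (out : Bool) : Prop := out = ellipsis_match_py_alt want got
instance (want : String) (got : String) (out : Bool) : Decidable (Spec_ellipsis_match_py want got out) := by unfold Spec_ellipsis_match_py; infer_instance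

-- ===== CLAIM (what is proved, stated in full; the proofs are below) =====
def Claim_equal_ellipsis_match_py : Prop := ∀ (want : String) (got : String), Dom_ellipsis_match_py want got → Spec_ellipsis_match_py want got (ellipsis_match_py want got)


-- ===== LEMMAS AND PROOFS =====

theorem pvFindEq (t w : List Char) (j : Nat) (h1 : w <+: t.drop j)
    (h2 : ∀ i < j, ¬ w <+: t.drop i) : PySem.Chars.find t w = (j : Int) := by
  have hinf : w <:+: t := by
    have := (PySem.Chars.exists_prefix_drop_iff_isIn w t).mp ⟨j, h1⟩
    exact (PySem.Chars.isIn_iff_infix w t).mp this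
  have hnn : 0 ≤ PySem.Chars.find t w := (PySem.Chars.find_nonneg_iff t w).mpr hinf
  obtain ⟨hp, hmin⟩ := PySem.Chars.find_spec hnn
  have hle : (PySem.Chars.find t w).toNat ≤ j := by
    by_contra hlt
    exact hmin j (by omega) h1
  have hge : j ≤ (PySem.Chars.find t w).toNat := by
    by_contra hlt
    exact h2 _ (by omega) hp
  omega

theorem pvPrefTake (w y : List Char) (i k : Nat) :
    w <+: (y.take k).drop i ↔ (w <+: y.drop i ∧ w.length ≤ k - i) := by
  rw [List.drop_take, List.prefix_take_iff]

theorem pvCmpNone (got w : List Char) (p e : Nat)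
    (h : PySem.Chars.find (got.drop p) w = -1) :
    PySem.Chars.find ((got.take e).drop p) w = -1 := by
  rw [PySem.Chars.find_eq_neg_one_iff] at h ⊢
  intro hinf
  exact h (hinf.trans (((List.drop_take (l := got) (i := p) (j := e)) ▸
    List.take_prefix (e - p) (got.drop p)).isInfix))

theorem pvCmpIn (got w : List Char) (p e : Nat) (j : Nat)
    (h : PySem.Chars.find (got.drop p) w = (j : Int)) (hfit : p + j + w.length ≤ e) :
    PySem.Chars.find ((got.take e).drop p) w = (j : Int) := by
  have hnn : 0 ≤ PySem.Chars.find (got.drop p) w := by rw [h]; omega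
  obtain ⟨hp, hmin⟩ := PySem.Chars.find_spec hnn
  rw [h] at hp hmin
  simp only [Int.toNat_natCast] at hp hmin
  rw [List.drop_drop] at hp
  apply pvFindEq
  · rw [List.drop_drop]
    exact (pvPrefTake w got (p + j) e).mpr ⟨hp, by omega⟩
  · intro i hi hpre
    rw [List.drop_drop] at hpre
    exact hmin i hi (by rw [List.drop_drop]; exact ((pvPrefTake w got (p + i) e).mp hpre).1)

theorem pvCmpOut (got w : List Char) (p e : Nat) (j : Nat) (hpe : p ≤ e)
    (h : PySem.Chars.find (got.drop p) w = (j : Int)) (hfit : e < p + j + w.length) :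
    PySem.Chars.find ((got.take e).drop p) w = -1 := by
  rcases List.eq_nil_or_concat w with hw | ⟨_, _, hw⟩
  · subst hw
    rw [PySem.Chars.find_nil] at h
    exfalso
    have : j = 0 := by exact_mod_cast h.symm
    simp only [List.length_nil] at hfit
    omega
  have hwlen : 1 ≤ w.length := by subst hw; simp
  have hnn : 0 ≤ PySem.Chars.find (got.drop p) w := by rw [h]; omega
  obtain ⟨hp, hmin⟩ := PySem.Chars.find_spec hnn
  rw [h] at hp hmin
  simp only [Int.toNat_natCast] at hp hmin
  rw [PySem.Chars.find_eq_neg_one_iff]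
  intro hinf
  obtain ⟨i, hpre⟩ := (PySem.Chars.exists_prefix_drop_iff_isIn w _).mpr
    ((PySem.Chars.isIn_iff_infix w _).mpr hinf)
  rw [List.drop_drop] at hpre
  obtain ⟨hocc, hlen⟩ := (pvPrefTake w got (p + i) e).mp hpre
  have hji : j ≤ i := by
    by_contra hij
    exact hmin i (by omega) (by rw [List.drop_drop]; exact hocc)
  omega

theorem pvSufDrop (got last : List Char) (p : Nat) (hs : last <:+ got)
    (hp : p + last.length ≤ got.length) : last <:+ got.drop p := by
  obtain ⟨u, rfl⟩ := hs
  rw [List.drop_append]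
  have : p - u.length = 0 := by simp at hp; omega
  rw [this, List.drop_zero]
  exact ⟨u.drop p, rfl⟩

theorem pvFF (got w : List Char) (p e : Nat) (hpe : p ≤ e) (hen : e ≤ got.length) :
    PySem.Chars.findFrom got w (p : Int) (some (e : Int)) =
      if PySem.Chars.find ((got.take e).drop p) w = -1 then -1
      else (p : Int) + PySem.Chars.find ((got.take e).drop p) w := by
  unfold PySem.Chars.findFrom
  have h1 : ¬ ((got.length : Int) < (e : Int)) := by exact_mod_cast not_lt.mpr (by exact_mod_cast hen)
  have h2 : ¬ ((p : Int) < 0) := by omega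
  have h4 : ¬ ((e : Int) < 0) := by omega
  simp only [if_neg h1, if_neg h2, if_neg h4]
  have h3 : ¬ ((e : Int) < (p : Int)) := by exact_mod_cast not_lt.mpr (by exact_mod_cast hpe)
  rw [if_neg h3]
  simp [Int.toNat_natCast]

theorem pvFindFit (t w : List Char) (j : Nat) (h : PySem.Chars.find t w = (j : Int)) :
    j + w.length ≤ t.length := by
  have hnn : 0 ≤ PySem.Chars.find t w := by rw [h]; omega
  obtain ⟨hp, -⟩ := PySem.Chars.find_spec hnn
  rw [h] at hp
  simp only [Int.toNat_natCast] at hp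
  have h1 := hp.length_le
  have h2 := PySem.Chars.find_le_length t w
  rw [h] at h2
  simp [List.length_drop] at h1
  omega

theorem pvShort (segs : List (List Char)) (s last : List Char)
    (h : s.length < last.length) : pvTailB (segs ++ [last]) s = false := by
  induction segs generalizing s with
  | nil =>
      simp only [List.nil_append, pvTailB]
      rw [Bool.eq_false_iff]
      intro hend
      exact absurd ((PySem.Chars.endswith_iff s last).mp hend).length_le (by omega)
  | cons seg M ih =>
      cases M with
      | nil =>
          simp only [List.cons_append, List.nil_append, pvTailB]
          split
          · rfl
          · next hneg =>
              apply ih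
              rw [PySem.Chars.slice_eq_listSlice, PySem.List.slice_from _ (by omega)]
              calc (s.drop _).length ≤ s.length := by simp
                _ < last.length := h
      | cons b bs =>
          simp only [List.cons_append, List.cons_append, pvTailB]
          split
          · rfl
          · next hneg =>
              apply ih
              rw [PySem.Chars.slice_eq_listSlice, PySem.List.slice_from _ (by omega)]
              calc (s.drop _).length ≤ s.length := by simp
                _ < last.length := h

theorem pvNoSuf (segs : List (List Char)) (s got last : List Char)
    (hs : s <:+ got) (h : ¬ last <:+ got) : pvTailB (segs ++ [last]) s = false := by
  induction segs generalizing s with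
  | nil =>
      simp only [List.nil_append, pvTailB]
      rw [Bool.eq_false_iff]
      intro hend
      exact h (((PySem.Chars.endswith_iff s last).mp hend).trans hs)
  | cons seg M ih =>
      cases M with
      | nil =>
          simp only [List.nil_append, List.cons_append, pvTailB]
          split
          · rfl
          · next hneg =>
              apply ih
              rw [PySem.Chars.slice_eq_listSlice, PySem.List.slice_from _ (by omega)]
              exact (List.drop_suffix _ s).trans hs
      | cons b bs =>
          simp only [List.cons_append, pvTailB]
          split
          · rfl
          · next hneg =>
              apply ih
              rw [PySem.Chars.slice_eq_listSlice, PySem.List.slice_from _ (by omega)]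
              exact (List.drop_suffix _ s).trans hs

theorem pvTailB_cons (seg : List Char) (t : List (List Char)) (s : List Char) (ht : t ≠ []) :
    pvTailB (seg :: t) s = (if PySem.Chars.find s seg < 0 then false
      else pvTailB t (PySem.Chars.slice s (some (PySem.Chars.find s seg + (seg.length : Int))) none)) := by
  cases t with
  | nil => exact absurd rfl ht
  | cons a as => rfl

theorem pvGetNat (s sub : List Char) (h : PySem.Chars.find s sub ≠ -1) :
    PySem.Chars.find s sub = ((PySem.Chars.find s sub).toNat : Int) := by
  have := PySem.Chars.neg_one_le_find s sub
  omega

theorem pvLeadEmpty (got : List Char) (M : List (List Char)) (p e : Nat)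
    (hpe : p ≤ e) (hen : e ≤ got.length) :
    pvLoopA got (e : Int) ([] :: M) (p : Int) = pvLoopA got (e : Int) M (p : Int) := by
  simp only [pvLoopA, pvFF got [] p e hpe hen, PySem.Chars.find_nil]
  norm_num

theorem pvTrailEmpty (got : List Char) (M : List (List Char)) (p e : Nat)
    (hpe : p ≤ e) (hen : e ≤ got.length) :
    pvLoopA got (e : Int) (M ++ [[]]) (p : Int) = pvLoopA got (e : Int) M (p : Int) := by
  induction M generalizing p with
  | nil =>
      simp only [List.nil_append, pvLoopA, pvFF got [] p e hpe hen, PySem.Chars.find_nil]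
      norm_num
  | cons w M ih =>
      simp only [List.cons_append, pvLoopA, pvFF got w p e hpe hen]
      by_cases hF : PySem.Chars.find ((got.take e).drop p) w = -1
      · simp [hF]
      · rw [if_neg hF]
        have hj := pvGetNat _ _ hF
        set j := (PySem.Chars.find ((got.take e).drop p) w).toNat with hjdef
        have hfit : j + w.length ≤ e - p := by
          have := pvFindFit ((got.take e).drop p) w j hj
          simpa [List.length_drop, List.length_take, Nat.min_eq_left hen] using this
        rw [hj]
        have harith : ((p : Int) + (j : Int)) + (w.length : Int) = ((p + j + w.length : Nat) : Int) := by
          push_cast; ring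
        have hlt : ¬ ((p : Int) + (j : Int) < 0) := by omega
        rw [if_neg (by omega : ¬ ((p : Int) + (j : Int) < 0)), harith,
          ih (p + j + w.length) (by omega), if_neg hlt]

theorem pvCore (got : List Char) (mids : List (List Char)) (last : List Char)
    (hs : last <:+ got) :
    ∀ p : Nat, p + last.length ≤ got.length →
    pvLoopA got ((got.length - last.length : Nat) : Int) mids (p : Int)
      = pvTailB (mids ++ [last]) (got.drop p) := by
  have hlast := hs.length_le
  set e : Nat := got.length - last.length with he
  induction mids with
  | nil =>
      intro p hp
      simp only [pvLoopA, List.nil_append, pvTailB]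
      exact ((PySem.Chars.endswith_iff _ _).mpr (pvSufDrop got last p hs hp)).symm
  | cons w rest ih =>
      intro p hp
      have hpe : p ≤ e := by omega
      have hen : e ≤ got.length := by omega
      rw [List.cons_append, pvTailB_cons w (rest ++ [last]) _ (by simp)]
      simp only [pvLoopA]
      rw [pvFF got w p e hpe hen]
      by_cases hB : PySem.Chars.find (got.drop p) w = -1
      · rw [pvCmpNone got w p e hB, hB]
        norm_num
      · have hj := pvGetNat _ _ hB
        set j := (PySem.Chars.find (got.drop p) w).toNat with hjdef
        rw [hj, if_neg (by omega : ¬ ((j : Int) < 0))]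
        rw [PySem.Chars.slice_eq_listSlice,
          PySem.List.slice_from _ (by omega : (0:Int) ≤ (j : Int) + (w.length : Int))]
        have hdd : (got.drop p).drop (((j : Int) + (w.length : Int)).toNat) = got.drop (p + (j + w.length)) := by
          have ht : ((j : Int) + (w.length : Int)).toNat = j + w.length := by omega
          rw [List.drop_drop, ht]
        rw [hdd]
        by_cases hfit : p + j + w.length ≤ e
        · rw [pvCmpIn got w p e j hj hfit]
          rw [if_neg (by omega : ¬ ((j : Int) = -1)), if_neg (by omega : ¬ ((p : Int) + (j : Int) < 0))]
          have harith : (p : Int) + (j : Int) + (w.length : Int) = ((p + (j + w.length) : Nat) : Int) := by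
            push_cast; ring
          rw [harith, ih (p + (j + w.length)) (by omega)]
        · rw [pvCmpOut got w p e j hpe hj (by omega)]
          norm_num
          refine (pvShort rest _ last ?_)
          simp only [List.length_drop]
          have hfit2 := pvFindFit (got.drop p) w j hj
          simp only [List.length_drop] at hfit2
          clear_value j
          omega

theorem pvCastE (n l : Nat) (h : l ≤ n) : (n : Int) - (l : Int) = ((n - l : Nat) : Int) := by
  omega

theorem pvAfterEq (gotL : List Char) (L M : List (List Char)) (last : List Char) (p : Nat)
    (hp : p ≤ gotL.length)
    (hL : L = M ++ [last] ∨ L = [] :: (M ++ [last])) :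
    pvAfterFirstA gotL L (p : Int) (gotL.length : Int) = pvTailB (M ++ [last]) (gotL.drop p) := by
  obtain ⟨pre, hpre, hL⟩ : ∃ pre, (pre = ([] : List (List Char)) ∨ pre = [[]]) ∧
      L = pre ++ (M ++ [last]) := by
    rcases hL with h | h
    · exact ⟨[], Or.inl rfl, h⟩
    · exact ⟨[[]], Or.inr rfl, h⟩
  have hlastget : L.getLast? = some last := by
    subst hL
    simp
  have hdropL : L.dropLast = pre ++ M := by
    subst hL
    rw [← List.append_assoc]
    simp
  unfold pvAfterFirstA
  rw [hlastget]
  simp only [Option.getD_some]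
  by_cases hl : last = []
  · subst hl
    rw [if_neg (by simp)]
    -- A runs pvFinalA on the full list, trailing [] included
    subst hL
    unfold pvFinalA
    rw [if_neg (by omega : ¬ ((p : Int) > (gotL.length : Int)))]
    have hstrip : pvLoopA gotL (gotL.length : Int) (pre ++ (M ++ [[]])) (p : Int)
        = pvLoopA gotL (gotL.length : Int) (M ++ [[]]) (p : Int) := by
      rcases hpre with h | h <;> subst h
      · rfl
      · exact pvLeadEmpty gotL (M ++ [[]]) p gotL.length hp le_rfl
    rw [hstrip, pvTrailEmpty gotL M p gotL.length hp le_rfl]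
    have := pvCore gotL M [] ⟨gotL, by simp⟩ p (by simpa using hp)
    simpa using this
  · rw [if_pos (by simpa using hl)]
    by_cases hend : PySem.Chars.endswith gotL last = true
    · rw [if_pos hend]
      have hsuf := (PySem.Chars.endswith_iff gotL last).mp hend
      have hll := hsuf.length_le
      rw [hdropL]
      unfold pvFinalA
      rw [pvCastE _ _ hll]
      by_cases hpe : p ≤ gotL.length - last.length
      · rw [if_neg (by omega : ¬ ((p : Int) > ((gotL.length - last.length : Nat) : Int)))]
        have hstrip : pvLoopA gotL (((gotL.length - last.length : Nat)) : Int) (pre ++ M) (p : Int)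
            = pvLoopA gotL (((gotL.length - last.length : Nat)) : Int) M (p : Int) := by
          rcases hpre with h | h <;> subst h
          · rfl
          · exact pvLeadEmpty gotL M p (gotL.length - last.length) hpe (by omega)
        rw [hstrip]
        exact pvCore gotL M last hsuf p (by omega)
      · rw [if_pos (by omega : ((p : Int) > ((gotL.length - last.length : Nat) : Int)))]
        exact (pvShort M _ last (by simp only [List.length_drop]; omega)).symm
    · rw [if_neg hend]
      refine (pvNoSuf M (gotL.drop p) gotL last (List.drop_suffix p gotL) ?_).symm
      intro hcon
      exact hend ((PySem.Chars.endswith_iff gotL last).mpr hcon)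

theorem pvStartNil (s : List Char) : PySem.Chars.startswith s [] = true := by
  simp [PySem.Chars.startswith]

theorem pvMainEq (want got : String) : ellipsis_match_py want got = ellipsis_match_py_alt want got := by
  unfold ellipsis_match_py ellipsis_match_py_alt
  by_cases hin : PySem.Str.isIn "..." want = false
  · rw [if_pos hin, if_pos hin]
  · rw [if_neg hin, if_neg hin]
    cases hwsc : PySem.Chars.splitOn want.toList "...".toList with
    | nil =>
        simp only [List.headD_nil, List.tail_nil]
        rw [if_neg (by simp), if_pos (pvStartNil got.toList)]
        unfold pvAfterFirstA pvFinalA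
        simp [pvLoopA, pvTailB]
    | cons f rest =>
        simp only [List.headD_cons, List.tail_cons]
        by_cases hst : PySem.Chars.startswith got.toList f = true
        · rw [if_pos hst, if_pos hst]
          rw [PySem.Chars.slice_eq_listSlice, PySem.List.slice_from _ (by omega : (0:Int) ≤ (f.length : Int)),
            Int.toNat_natCast]
          have hp : f.length ≤ got.toList.length :=
            ((PySem.Chars.startswith_iff _ _).mp hst).length_le
          rcases List.eq_nil_or_concat rest with hr | ⟨M, last, hr⟩
          · subst hr
            by_cases hf : f = []
            · subst hf
              rw [if_neg (by simp)]
              unfold pvAfterFirstA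
              simp only [List.getLast?_singleton, Option.getD_some, ne_eq, not_true_eq_false,
                if_false]
              unfold pvFinalA
              rw [if_neg (by omega : ¬ ((0 : Int) > (got.toList.length : Int)))]
              have hle := pvLeadEmpty got.toList [] 0 got.toList.length (by omega) le_rfl
              simp only [Nat.cast_zero] at hle
              rw [hle]
              rfl
            · rw [if_pos hf]
              unfold pvAfterFirstA
              simp only [List.getLast?_nil, Option.getD_none, ne_eq, not_true_eq_false, if_false]
              unfold pvFinalA
              rw [if_neg (by omega : ¬ ((f.length : Int) > (got.toList.length : Int)))]
              rfl
          · subst hr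
            rw [List.concat_eq_append]
            by_cases hf : f = []
            · subst hf
              rw [if_neg (by simp)]
              have := pvAfterEq got.toList ([] :: (M ++ [last])) M last 0 (by omega) (Or.inr rfl)
              simp only [Nat.cast_zero] at this
              simpa using this
            · rw [if_pos hf]
              exact pvAfterEq got.toList (M ++ [last]) M last f.length hp (Or.inl rfl)
        · have hf : f ≠ [] := by
            intro h
            subst h
            exact hst (pvStartNil got.toList)
          rw [if_pos hf, if_neg hst, if_neg hst]

-- ===== VERDICT (by name: the statement is the Claim_ definition above) =====
theorem ellipsis_match_py_spec : Claim_equal_ellipsis_match_py := by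
  unfold Claim_equal_ellipsis_match_py Spec_ellipsis_match_py
  intro want got _
  exact pvMainEq want got
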